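-- pv_equiv track=rewrite | github.com/edelsonc/FlEye_Reader | FlEye_Reader.py | match_ranges
-- ===== SOURCE A (Python) =====
-- def match_ranges(starts, ends):
--     """
--     Helper function to take sets of start points and end points and create
--     valid intervals for data runs. This is done by taking the ordered list of
--     start points and for each start point finding the first end point that is
--     greater than it.
--
--     Arguments
--     ---------
--     starts -- sorted list of start points
--     ends -- sorted list of end points
--
--     Example:
--     >>> match_ranges([1, 7, 15], [14, 77])
--     [(1, 14), (7, 14), (15, 77)]
--     """
--     runs = []
--     for start in starts:
--         for end in ends:
--             if start < end:
--                 runs.append((start, end))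
--                 break
--     return runs
-- ===== SOURCE B (Python) =====
-- def match_ranges(starts, ends):
--     # Prefix maxima of ends: the first end greater than s is at the first
--     # index where the prefix maximum exceeds s; since prefix maxima are
--     # nondecreasing, that index is found by binary search.
--     pm = []
--     m = None
--     for e in ends:
--         if m is None or e > m:
--             m = e
--         pm.append(m)
--     n = len(ends)
--     runs = []
--     for s in starts:
--         lo, hi = 0, n
--         while lo < hi:
--             mid = (lo + hi) // 2
--             if pm[mid] <= s:
--                 lo = mid + 1
--             else:
--                 hi = mid
--         if lo < n:
--             runs.append((s, ends[lo]))
--     return runs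
-- ===== Notes on version B (the rewrite author's own statement) =====
-- stated objective: faster
-- what changed: Replaces the per-start linear scan of ends with a precomputed prefix-maximum array and a binary search per start (the first end greater than s is at the first index where the prefix maximum exceeds s).
import Mathlib
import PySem

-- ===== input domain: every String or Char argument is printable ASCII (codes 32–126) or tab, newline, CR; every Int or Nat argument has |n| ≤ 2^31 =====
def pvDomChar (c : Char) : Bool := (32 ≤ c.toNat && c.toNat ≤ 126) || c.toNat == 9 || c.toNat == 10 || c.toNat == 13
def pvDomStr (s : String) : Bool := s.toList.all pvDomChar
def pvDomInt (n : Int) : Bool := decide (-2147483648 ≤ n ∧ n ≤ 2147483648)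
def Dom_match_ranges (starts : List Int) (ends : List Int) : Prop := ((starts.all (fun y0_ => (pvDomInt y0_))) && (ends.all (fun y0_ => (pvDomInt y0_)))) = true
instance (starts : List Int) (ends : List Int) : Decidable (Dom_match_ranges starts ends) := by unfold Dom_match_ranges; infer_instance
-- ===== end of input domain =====

-- B replaces A's per-start linear scan of ends by a prefix-maximum array plus a
-- binary search per start (objective: faster; exact same results).

-- ===== PORT A =====
-- inner loop of A: first end with start < end (the break)
def pvMatchOne (start : Int) : List Int → List (Int × Int)
  | [] => []
  | e :: rest => if start < e then [(start, e)] else pvMatchOne start rest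

def match_ranges (starts : List Int) (ends : List Int) : List (Int × Int) :=
  starts.foldl (fun runs s => runs ++ pvMatchOne s ends) []

-- ===== PORT B =====
-- prefix maxima of ends (acc = max of the consumed prefix, none at the start)
def pvPrefMax : List Int → Option Int → List Int
  | [], _ => []
  | e :: rest, acc =>
      let m : Int := match acc with
        | none => e
        | some m0 => if e > m0 then e else m0
      m :: pvPrefMax rest (some m)

-- the while-loop of B, with fuel hi - lo (each iteration shrinks hi - lo, so it suffices)
def pvBSearchGo (pm : List Int) (s : Int) : Nat → Nat → Nat → Nat
  | 0, lo, _ => lo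
  | fuel + 1, lo, hi =>
    if lo < hi then
      if pm.getD ((lo + hi) / 2) 0 ≤ s then pvBSearchGo pm s fuel ((lo + hi) / 2 + 1) hi
      else pvBSearchGo pm s fuel lo ((lo + hi) / 2)
    else lo

def pvBSearch (pm : List Int) (s : Int) (lo hi : Nat) : Nat :=
  pvBSearchGo pm s (hi - lo) lo hi

def match_ranges_alt (starts : List Int) (ends : List Int) : List (Int × Int) :=
  let pm := pvPrefMax ends none
  let n := ends.length
  starts.foldl (fun runs s =>
    let lo := pvBSearch pm s 0 n
    if lo < n then runs ++ [(s, ends.getD lo 0)] else runs) []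

-- ===== PRECONDITION & SPEC =====
def Spec_match_ranges (starts : List Int) (ends : List Int) (out : List (Int × Int)) : Prop := out = match_ranges_alt starts ends
instance (starts : List Int) (ends : List Int) (out : List (Int × Int)) : Decidable (Spec_match_ranges starts ends out) := by unfold Spec_match_ranges; infer_instance

-- ===== CLAIM (what is proved, stated in full; the proofs are below) =====
def Claim_equal_match_ranges : Prop := ∀ (starts : List Int) (ends : List Int), Dom_match_ranges starts ends → Spec_match_ranges starts ends (match_ranges starts ends)

-- ===== LEMMAS AND PROOFS =====

-- ===== VERDICT (by name: the statement is the Claim_ definition above) =====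



-- ∀ over a cons prefix, unpacked
theorem pvForall_getD_cons (e s : Int) (rest : List Int) (i : Nat) :
    (∀ j, j ≤ i + 1 → (e :: rest).getD j 0 ≤ s) ↔
      (e ≤ s ∧ ∀ j, j ≤ i → rest.getD j 0 ≤ s) := by
  constructor
  · intro h
    exact ⟨by simpa using h 0 (by omega), fun j hj => by simpa using h (j + 1) (by omega)⟩
  · rintro ⟨he, h⟩ j hj
    cases j with
    | zero => simpa using he
    | succ j' => simpa using h j' (by omega)

-- pm[i] ≤ s iff the accumulator and every end up to i are ≤ s
theorem pvPrefMax_le (s : Int) (ends : List Int) (acc : Option Int) (i : Nat)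
    (hi : i < ends.length) :
    ((pvPrefMax ends acc).getD i 0 ≤ s) ↔
      ((∀ a, acc = some a → a ≤ s) ∧ ∀ j, j ≤ i → ends.getD j 0 ≤ s) := by
  induction ends generalizing acc i with
  | nil => simp at hi
  | cons e rest ih =>
    cases i with
    | zero =>
      have hrhs : (∀ j, j ≤ 0 → (e :: rest).getD j 0 ≤ s) ↔ e ≤ s := by
        constructor
        · intro h; simpa using h 0 (by omega)
        · intro he j hj
          cases j with
          | zero => simpa using he
          | succ j' => omega
      cases acc with
      | none =>
        simp only [pvPrefMax, List.getD_cons_zero, hrhs]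
        constructor
        · intro h; exact ⟨fun a ha => (by cases ha), h⟩
        · rintro ⟨-, h⟩; exact h
      | some m0 =>
        by_cases hc : e > m0
        · simp only [pvPrefMax, List.getD_cons_zero, if_pos hc, hrhs]
          constructor
          · intro h; exact ⟨fun a ha => (by cases ha; omega), h⟩
          · rintro ⟨-, h⟩; exact h
        · simp only [pvPrefMax, List.getD_cons_zero, if_neg hc, hrhs]
          constructor
          · intro h; exact ⟨fun a ha => (by cases ha; exact h), by omega⟩
          · rintro ⟨ha, -⟩; exact ha m0 rfl
    | succ i' =>
      have hi' : i' < rest.length := by simpa using hi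
      cases acc with
      | none =>
        simp only [pvPrefMax, List.getD_cons_succ]
        rw [ih (some e) i' hi', pvForall_getD_cons]
        constructor
        · rintro ⟨ha, hj⟩
          exact ⟨fun a h => (by cases h), ha e rfl, hj⟩
        · rintro ⟨-, he, hj⟩
          exact ⟨fun a h => (by cases h; exact he), hj⟩
      | some m0 =>
        by_cases hc : e > m0
        · simp only [pvPrefMax, if_pos hc, List.getD_cons_succ]
          rw [ih (some e) i' hi', pvForall_getD_cons]
          constructor
          · rintro ⟨ha, hj⟩
            have he := ha e rfl
            exact ⟨fun a h => (by cases h; omega), he, hj⟩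
          · rintro ⟨-, he, hj⟩
            exact ⟨fun a h => (by cases h; exact he), hj⟩
        · simp only [pvPrefMax, if_neg hc, List.getD_cons_succ]
          rw [ih (some m0) i' hi', pvForall_getD_cons]
          constructor
          · rintro ⟨ha, hj⟩
            have hm := ha m0 rfl
            exact ⟨ha, by omega, hj⟩
          · rintro ⟨ha, -, hj⟩
            exact ⟨ha, hj⟩

-- pm[i] ≤ s ↔ i < (first index of ends with s < end), for i < ends.length
theorem pvPM_lt_findIdx (s : Int) (ends : List Int) (i : Nat) (hi : i < ends.length) :
    ((pvPrefMax ends none).getD i 0 ≤ s) ↔ i < ends.findIdx (fun e => s < e) := by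
  rw [pvPrefMax_le s ends none i hi]
  constructor
  · rintro ⟨-, hj⟩
    by_contra hlt
    have hklen : ends.findIdx (fun e => s < e) < ends.length := by omega
    have hp := List.findIdx_getElem (w := hklen)
    have h2 := hj _ (by omega : ends.findIdx (fun e => s < e) ≤ i)
    rw [List.getD_eq_getElem _ _ hklen] at h2
    simp only [decide_eq_true_eq] at hp
    omega
  · intro hik
    refine ⟨fun a h => (by cases h), fun j hj => ?_⟩
    have hjlen : j < ends.length := by omega
    have hnp := List.not_of_lt_findIdx (p := fun e => s < e) (xs := ends)
      (by omega : j < ends.findIdx (fun e => s < e))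
    rw [List.getD_eq_getElem _ _ hjlen]
    simp only [decide_eq_false_iff_not, not_lt] at hnp
    exact hnp

-- the binary search returns k whenever lo ≤ k ≤ hi ≤ ends.length
theorem pvBSearchGo_eq (s : Int) (ends : List Int) :
    ∀ fuel lo hi, hi - lo ≤ fuel → lo ≤ ends.findIdx (fun e => s < e) →
      ends.findIdx (fun e => s < e) ≤ hi → hi ≤ ends.length →
      pvBSearchGo (pvPrefMax ends none) s fuel lo hi = ends.findIdx (fun e => s < e) := by
  intro fuel
  induction fuel with
  | zero => intro lo hi hd hlo hhi hlen; simp only [pvBSearchGo]; omega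
  | succ fuel ih =>
    intro lo hi hd hlo hhi hlen
    simp only [pvBSearchGo]
    split
    · rename_i h
      have hmidlt : (lo + hi) / 2 < ends.length := by omega
      have hchar := pvPM_lt_findIdx s ends ((lo + hi) / 2) hmidlt
      split
      · rename_i hle
        have hk : (lo + hi) / 2 < ends.findIdx (fun e => s < e) := hchar.mp hle
        exact ih _ _ (by omega) (by omega) hhi hlen
      · rename_i hgt
        have hk : ¬ (lo + hi) / 2 < ends.findIdx (fun e => s < e) := fun hc => hgt (hchar.mpr hc)
        exact ih _ _ (by omega) hlo (by omega) (by omega)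
    · omega

theorem pvBSearch_eq (s : Int) (ends : List Int) (lo hi : Nat)
    (hlo : lo ≤ ends.findIdx (fun e => s < e))
    (hhi : ends.findIdx (fun e => s < e) ≤ hi) (hlen : hi ≤ ends.length) :
    pvBSearch (pvPrefMax ends none) s lo hi = ends.findIdx (fun e => s < e) :=
  pvBSearchGo_eq s ends (hi - lo) lo hi (le_refl _) hlo hhi hlen

-- A's inner loop expressed through findIdx
theorem pvMatchOne_eq (s : Int) (ends : List Int) :
    pvMatchOne s ends =
      (if ends.findIdx (fun e => s < e) < ends.length
       then [(s, ends.getD (ends.findIdx (fun e => s < e)) 0)] else []) := by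
  induction ends with
  | nil => simp [pvMatchOne]
  | cons e rest ih =>
    by_cases h : s < e
    · simp [pvMatchOne, h, List.findIdx_cons]
    · simp only [pvMatchOne, if_neg h, ih, List.findIdx_cons, decide_eq_false h,
        cond_false, List.getD_cons_succ, List.length_cons, Nat.add_lt_add_iff_right]

-- per-start step equality
theorem pvStep_eq (s : Int) (ends : List Int) :
    (if pvBSearch (pvPrefMax ends none) s 0 ends.length < ends.length
     then [(s, ends.getD (pvBSearch (pvPrefMax ends none) s 0 ends.length) 0)] else []) =
      pvMatchOne s ends := by
  have hk := List.findIdx_le_length (p := fun e => s < e) (xs := ends)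
  rw [pvBSearch_eq s ends 0 ends.length (by omega) hk (le_refl _), pvMatchOne_eq]

-- fold congruence
theorem pvFold_eq (starts : List Int) (ends : List Int) (acc : List (Int × Int)) :
    starts.foldl (fun runs s => runs ++ pvMatchOne s ends) acc =
      starts.foldl (fun runs s =>
        let lo := pvBSearch (pvPrefMax ends none) s 0 ends.length
        if lo < ends.length then runs ++ [(s, ends.getD lo 0)] else runs) acc := by
  induction starts generalizing acc with
  | nil => rfl
  | cons s rest ih =>
    simp only [List.foldl_cons]
    rw [← ih]
    congr 1
    have := pvStep_eq s ends
    split at this <;> simp_all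

-- ===== VERDICT =====
theorem match_ranges_spec : Claim_equal_match_ranges := by
  intro starts ends _
  unfold Spec_match_ranges match_ranges match_ranges_alt
  exact pvFold_eq starts ends []
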